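-- pv_equiv track=rewrite | github.com/sravya24kodali/serenity-app | serenity-backend/nlp/topic_detector.py | get_topic_category
-- ===== SOURCE A (Python) =====
-- def get_topic_category(topics: list) -> str:
--     """
--     Get primary topic category from list of detected topics.
--     Useful for prioritizing which topic to focus on.
--
--     Args:
--         topics (list): List of detected topics
--
--     Returns:
--         str: Primary topic or "general"
--     """
--     if not topics:
--         return "general"
--
--     # Priority order (high severity first)
--     priority = [
--         "suicidal", "self_harm", "grief", "depression",
--         "anxiety", "anger", "loneliness", "sleep",
--         "relationships", "work", "coping", "general"
--     ]
--
--     for p in priority: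
--         if p in topics:
--             return p
--
--     return topics[0] if topics else "general"
-- ===== SOURCE B (Python) =====
-- _PRIORITY = [
--     "suicidal", "self_harm", "grief", "depression",
--     "anxiety", "anger", "loneliness", "sleep",
--     "relationships", "work", "coping", "general",
-- ]
-- _RANK = {label: i for i, label in enumerate(_PRIORITY)}
--
--
-- def get_topic_category(topics: list) -> str:
--     """Primary topic category: best-ranked detected topic, or "general"."""
--     if not topics:
--         return "general"
--     return min(topics, key=lambda t: _RANK.get(t, len(_PRIORITY)))
-- ===== Notes on version B (the rewrite author's own statement) =====
-- stated objective: idiomatic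
-- what changed: Replaces A's loop over the priority list with a `p in topics` membership scan per label by a precomputed label-to-rank dict and a single min(topics, key=rank) pass over topics.
import Mathlib
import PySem

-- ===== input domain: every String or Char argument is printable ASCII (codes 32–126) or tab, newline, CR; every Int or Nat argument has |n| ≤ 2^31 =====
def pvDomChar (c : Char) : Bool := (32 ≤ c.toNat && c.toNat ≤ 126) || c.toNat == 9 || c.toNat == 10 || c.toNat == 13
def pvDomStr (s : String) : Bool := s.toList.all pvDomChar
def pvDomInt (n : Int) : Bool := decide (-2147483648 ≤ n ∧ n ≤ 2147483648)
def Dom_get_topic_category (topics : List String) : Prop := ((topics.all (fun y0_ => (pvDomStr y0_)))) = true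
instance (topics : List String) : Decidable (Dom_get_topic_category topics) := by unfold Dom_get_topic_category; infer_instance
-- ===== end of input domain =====

-- B replaces A's scan over the fixed priority list (one `p in topics` membership scan per
-- priority label) by a precomputed label→rank dict and a single min() pass over topics
-- (objective: idiomatic; same observable behaviour, no mutation).

-- ===== PORT A =====
def pvPriority : List String :=
  ["suicidal", "self_harm", "grief", "depression",
   "anxiety", "anger", "loneliness", "sleep",
   "relationships", "work", "coping", "general"]

-- `for p in priority: if p in topics: return p` — first priority label present in topics
def pvScanA : List String → List String → Option String
  | [], _ => none
  | p :: ps, topics => if topics.contains p then some p else pvScanA ps topics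

def get_topic_category (topics : List String) : String :=
  if topics = [] then "general"
  else
    match pvScanA pvPriority topics with
    | some p => p
    | none =>
      -- `topics[0] if topics else "general"`
      match PySem.List.pyGet? topics 0 with
      | some x => x
      | none => "general"

-- ===== PORT B =====
def pvPriorityB : List String :=
  ["suicidal", "self_harm", "grief", "depression",
   "anxiety", "anger", "loneliness", "sleep",
   "relationships", "work", "coping", "general"]

-- _RANK = {label: i for i, label in enumerate(_PRIORITY)}
def pvRank : PySem.Dict String Int :=
  PySem.Dict.ofList ((PySem.List.enumerate pvPriorityB).map (fun pr => (pr.2, pr.1)))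

-- lambda t: _RANK.get(t, len(_PRIORITY))
def pvRankKey (t : String) : Int :=
  PySem.Dict.getD pvRank t ((pvPriorityB.length : Nat) : Int)

def get_topic_category_alt (topics : List String) : String :=
  if topics = [] then "general"
  else
    match PySem.List.min? topics pvRankKey with
    | some m => m
    | none => "general"   -- unreachable: topics is nonempty here

-- ===== PRECONDITION & SPEC =====
def Spec_get_topic_category (topics : List String) (out : String) : Prop := out = get_topic_category_alt topics
instance (topics : List String) (out : String) : Decidable (Spec_get_topic_category topics out) := by unfold Spec_get_topic_category; infer_instance

-- ===== CLAIM (what is proved, stated in full; the proofs are below) =====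
def Claim_equal_get_topic_category : Prop := ∀ (topics : List String), Dom_get_topic_category topics → Spec_get_topic_category topics (get_topic_category topics)

-- ===== LEMMAS AND PROOFS =====

-- The rank the dict assigns is the index of t in the priority list (length 12 when absent).
lemma pvRankKey_eq_idxOf (t : String) :
    pvRankKey t = ((pvPriorityB.idxOf t : Nat) : Int) := by
  simp [pvRankKey, pvRank, pvPriorityB, PySem.Dict.ofList, PySem.Dict.getD, PySem.Dict.get?,
    PySem.List.enumerate, PySem.Dict.update, PySem.Dict.insert, PySem.Dict.empty,
    PySem.Dict.contains, List.find?, List.idxOf, List.findIdx, List.findIdx.go]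
  cases "suicidal" == t <;> cases "self_harm" == t <;> cases "grief" == t <;>
    cases "depression" == t <;> cases "anxiety" == t <;> cases "anger" == t <;>
    cases "loneliness" == t <;> cases "sleep" == t <;> cases "relationships" == t <;>
    cases "work" == t <;> cases "coping" == t <;> cases "general" == t <;> rfl

lemma pvScanA_none {ps topics : List String} (h : pvScanA ps topics = none) :
    ∀ p ∈ ps, p ∉ topics := by
  induction ps with
  | nil => simp
  | cons a ps ih =>
    intro p hp
    by_cases ha : a ∈ topics
    · simp [pvScanA, ha] at h
    · rcases List.mem_cons.mp hp with rfl | hp'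
      · exact ha
      · exact ih (by simpa [pvScanA, ha] using h) p hp'

lemma pvScanA_some {ps topics : List String} {p : String} (h : pvScanA ps topics = some p) :
    p ∈ topics ∧
      ∃ n, n < ps.length ∧ ps[n]? = some p ∧
        ∀ m < n, ∀ q, ps[m]? = some q → q ∉ topics := by
  induction ps with
  | nil => simp [pvScanA] at h
  | cons a ps ih =>
    by_cases ha : a ∈ topics
    · have hpa : a = p := by simpa [pvScanA, ha] using h
      subst hpa
      exact ⟨ha, 0, by simp, by simp, by omega⟩
    · have h' : pvScanA ps topics = some p := by simpa [pvScanA, ha] using h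
      obtain ⟨hc, n, hn, hg, hbef⟩ := ih h'
      refine ⟨hc, n + 1, by simpa using hn, by simpa using hg, ?_⟩
      intro m hm q hq
      cases m with
      | zero => simp at hq; subst hq; exact ha
      | succ m => exact hbef m (by omega) q (by simpa using hq)

-- the fold step of min(xs, key): keep the accumulator unless the next element is strictly smaller
def pvMinStep (key : String → Int) (acc : Option String) (x : String) : Option String :=
  match acc with
  | none => some x
  | some m => if key x < key m then some x else some m

lemma min?_eq_foldl (xs : List String) (key : String → Int) :
    PySem.List.min? xs key = xs.foldl (pvMinStep key) none := by
  simp only [PySem.List.min?]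
  exact List.foldl_ext _ _ none (fun a b _ => by cases a <;> rfl)

-- the accumulator survives the fold when nothing beats it strictly
lemma foldl_min_stay (key : String → Int) :
    ∀ (xs : List String) (p : String), (∀ y ∈ xs, ¬ key y < key p) →
      xs.foldl (pvMinStep key) (some p) = some p := by
  intro xs
  induction xs with
  | nil => intro p _; rfl
  | cons x xs ih =>
    intro p h
    have hx : ¬ key x < key p := h x (by simp)
    simpa [List.foldl, pvMinStep, hx] using ih p (fun y hy => h y (by simp [hy]))

-- a strict minimizer waiting in the tail is reached and then kept
lemma foldl_min_reach (key : String → Int) :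
    ∀ (xs : List String) (a p : String), p ∈ xs → key p < key a →
      (∀ y ∈ xs, y ≠ p → key p < key y) →
      xs.foldl (pvMinStep key) (some a) = some p := by
  intro xs
  induction xs with
  | nil => intro a p hp; simp at hp
  | cons x xs ih =>
    intro a p hp hlt hmin
    by_cases hxp : x = p
    · subst hxp
      simp only [List.foldl, pvMinStep, hlt, if_pos]
      exact foldl_min_stay key xs x (by
        intro y hy
        by_cases hyx : y = x
        · subst hyx; omega
        · have := hmin y (by simp [hy]) hyx; omega)
    · have hpx : key p < key x := hmin x (by simp) hxp
      have hp' : p ∈ xs := by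
        rcases List.mem_cons.mp hp with rfl | h
        · exact absurd rfl hxp
        · exact h
      by_cases hc : key x < key a
      · simpa [List.foldl, pvMinStep, hc] using
          ih x p hp' hpx (fun y hy => hmin y (by simp [hy]))
      · simpa [List.foldl, pvMinStep, hc] using
          ih a p hp' hlt (fun y hy => hmin y (by simp [hy]))

-- min(topics, key) returns the unique strict minimizer
lemma min?_of_strict_min (key : String → Int) {topics : List String} {p : String}
    (hp : p ∈ topics) (hmin : ∀ y ∈ topics, y ≠ p → key p < key y) :
    PySem.List.min? topics key = some p := by
  cases topics with
  | nil => simp at hp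
  | cons x xs =>
    rw [min?_eq_foldl]
    show List.foldl (pvMinStep key) (some x) xs = some p
    by_cases hxp : x = p
    · subst hxp
      exact foldl_min_stay key xs x (by
        intro y hy
        by_cases hyx : y = x
        · subst hyx; omega
        · have := hmin y (by simp [hy]) hyx; omega)
    · have hpx : key p < key x := hmin x (by simp) hxp
      have hp' : p ∈ xs := by
        rcases List.mem_cons.mp hp with rfl | h
        · exact absurd rfl hxp
        · exact h
      exact foldl_min_reach key xs x p hp' hpx (fun y hy => hmin y (by simp [hy]))

-- with all keys equal, min(topics, key) keeps the first element
lemma min?_of_const (key : String → Int) (c : Int) {x : String} {xs : List String}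
    (h : ∀ y ∈ x :: xs, key y = c) :
    PySem.List.min? (x :: xs) key = some x := by
  rw [min?_eq_foldl]
  show List.foldl (pvMinStep key) (some x) xs = some x
  exact foldl_min_stay key xs x (by
    intro y hy
    have h1 : key y = c := h y (by simp [hy])
    have h2 : key x = c := h x (by simp)
    omega)

lemma nodup_pvPriorityB : pvPriorityB.Nodup := by decide

lemma rank_not_mem {t : String} (h : t ∉ pvPriorityB) : pvRankKey t = 12 := by
  rw [pvRankKey_eq_idxOf, List.idxOf_eq_length_iff.mpr h]; rfl

theorem get_topic_category_spec : Claim_equal_get_topic_category := by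
  intro topics _
  unfold Spec_get_topic_category
  by_cases h0 : topics = []
  · simp [get_topic_category, get_topic_category_alt, h0]
  obtain ⟨x, xs, rfl⟩ := List.exists_cons_of_ne_nil h0
  cases hscan : pvScanA pvPriority (x :: xs) with
  | none =>
    have hall : ∀ p ∈ pvPriority, p ∉ x :: xs := pvScanA_none hscan
    have hkey : ∀ y ∈ x :: xs, pvRankKey y = 12 := by
      intro y hy
      exact rank_not_mem (fun hmem => hall y hmem hy)
    simp [get_topic_category, get_topic_category_alt, hscan,
      min?_of_const pvRankKey 12 hkey, PySem.List.pyGet?, PySem.List.pyIdx?]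
  | some p =>
    obtain ⟨hpmem, n, hn, hg, hbef⟩ := pvScanA_some hscan
    have hps : pvPriority = pvPriorityB := rfl
    rw [hps] at hn hg hbef
    have hlen : pvPriorityB.length = 12 := rfl
    have hgn : pvPriorityB[n]'hn = p := by
      have he := List.getElem?_eq_getElem (l := pvPriorityB) (i := n) hn
      rw [he] at hg; exact Option.some.inj hg
    have hidxp : pvPriorityB.idxOf p = n := by
      subst hgn
      exact List.Nodup.idxOf_getElem nodup_pvPriorityB _ _
    have hmin : ∀ y ∈ x :: xs, y ≠ p → pvRankKey p < pvRankKey y := by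
      intro y hy hyp
      rw [pvRankKey_eq_idxOf, pvRankKey_eq_idxOf, hidxp]
      by_cases hmem : y ∈ pvPriorityB
      · have hm : pvPriorityB.idxOf y < pvPriorityB.length :=
          List.idxOf_lt_length_of_mem hmem
        have hgm : pvPriorityB[pvPriorityB.idxOf y]? = some y := by
          rw [List.getElem?_eq_getElem hm, List.getElem_idxOf hm]
        rcases lt_trichotomy (pvPriorityB.idxOf y) n with hlt | heq | hgt
        · exact absurd hy (hbef (pvPriorityB.idxOf y) hlt y hgm)
        · exfalso
          rw [heq, List.getElem?_eq_getElem hn, hgn] at hgm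
          exact hyp (Option.some.inj hgm).symm
        · exact_mod_cast hgt
      · rw [List.idxOf_eq_length_iff.mpr hmem, hlen]
        have : n < 12 := by omega
        exact_mod_cast this
    simp [get_topic_category, get_topic_category_alt, hscan,
      min?_of_strict_min pvRankKey hpmem hmin]
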